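-- pv_equiv track=rewrite | github.com/macmorn/business_data_scraper | stages/s01_pdf_extract.py | _find_text_segments
-- ===== SOURCE A (Python) =====
-- def _find_text_segments(line: str) -> list[tuple[int, str]]:
--     """Find all contiguous text segments in a line, separated by 2+ spaces.
--
--     Returns list of (start_position, text) tuples.
--     """
--     segments = []
--     i = 0
--     n = len(line)
--     while i < n:
--         # Skip whitespace
--         while i < n and line[i] == " ":
--             i += 1
--         if i >= n:
--             break
--         start = i
--         # Consume text (including single spaces within words)
--         while i < n:
--             if line[i] == " ":
--                 # Check if this is a multi-space gap (2+)
--                 j = i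
--                 while j < n and line[j] == " ":
--                     j += 1
--                 if j - i >= 2:
--                     break  # column separator
--                 i = j  # single space, continue
--             else:
--                 i += 1
--         segments.append((start, line[start:i].strip()))
--     return segments
-- ===== SOURCE B (Python) =====
-- def _find_text_segments(line: str) -> list[tuple[int, str]]:
--     """Split on single spaces, then group maximal runs of non-empty tokens.
--
--     A run of 2+ spaces shows up as at least one empty token in line.split(' '),
--     so segments are exactly the maximal runs of consecutive non-empty tokens;
--     a running position counter recovers each segment's start offset.
--     """
--     segments = []
--     pos = 0
--     run_start = None
--     run_tokens = []
--     for tok in line.split(' '):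
--         if tok:
--             if run_start is None:
--                 run_start = pos
--             run_tokens.append(tok)
--         else:
--             if run_tokens:
--                 segments.append((run_start, ' '.join(run_tokens).strip()))
--                 run_start = None
--                 run_tokens = []
--         pos += len(tok) + 1
--     if run_tokens:
--         segments.append((run_start, ' '.join(run_tokens).strip()))
--     return segments
-- ===== Notes on version B (the rewrite author's own statement) =====
-- stated objective: faster
-- what changed: Replaced the index-based nested-while scan (with lookahead over space runs) by a single split-on-single-space pass that groups maximal runs of non-empty tokens and recovers start offsets from a running position counter.
import Mathlib
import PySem

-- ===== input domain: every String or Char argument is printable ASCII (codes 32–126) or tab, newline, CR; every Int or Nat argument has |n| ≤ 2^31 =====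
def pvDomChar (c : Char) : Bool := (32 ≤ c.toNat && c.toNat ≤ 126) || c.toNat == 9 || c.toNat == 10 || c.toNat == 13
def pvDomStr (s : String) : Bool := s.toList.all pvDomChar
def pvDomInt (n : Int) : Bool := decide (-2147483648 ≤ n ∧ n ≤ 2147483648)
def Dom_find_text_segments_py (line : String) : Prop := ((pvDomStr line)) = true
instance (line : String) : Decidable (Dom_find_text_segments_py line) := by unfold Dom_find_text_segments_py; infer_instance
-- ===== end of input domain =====

-- B replaces A's index-based nested-while scan by one split-on-single-space pass that groups
-- maximal runs of non-empty tokens (objective: faster, measured constant-factor; return values only).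

-- ===== PORT A =====
-- A's "while … line[j] == ' ': j += 1" space-run loop (used to skip leading whitespace and
-- to measure a gap); termination lemmas for the ports are stated just below it.
def pvSpaceEnd (s : List Char) (i : Nat) : Nat :=
  if h : i < s.length ∧ s.getD i 'x' = ' ' then pvSpaceEnd s (i + 1) else i
termination_by s.length - i
decreasing_by omega

theorem le_pvSpaceEnd (s : List Char) (i : Nat) : i ≤ pvSpaceEnd s i := by
  fun_induction pvSpaceEnd s i with
  | case1 i h ih => omega
  | case2 i h => omega

theorem pvSpaceEnd_stop (s : List Char) (i : Nat) (h : pvSpaceEnd s i < s.length) :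
    s.getD (pvSpaceEnd s i) 'x' ≠ ' ' := by
  fun_induction pvSpaceEnd s i with
  | case1 i h' ih => exact ih h
  | case2 i h' =>
    intro hc
    exact h' ⟨h, hc⟩

theorem lt_pvSpaceEnd (s : List Char) (i : Nat) (h1 : i < s.length)
    (h2 : s.getD i 'x' = ' ') : i < pvSpaceEnd s i := by
  rw [pvSpaceEnd]
  simp only [h1, h2, and_self, dite_true]
  exact Nat.lt_of_lt_of_le (Nat.lt_succ_self i) (le_pvSpaceEnd s (i + 1))

-- A's inner "consume text" while-loop.
def pvConsume (s : List Char) (i : Nat) : Nat :=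
  if h : i < s.length then
    if hsp : s.getD i 'x' = ' ' then
      let j := pvSpaceEnd s i
      if 2 ≤ j - i then i else pvConsume s j
    else pvConsume s (i + 1)
  else i
termination_by s.length - i
decreasing_by
  · have := lt_pvSpaceEnd s i h hsp; omega
  · omega

theorem le_pvConsume (s : List Char) (i : Nat) : i ≤ pvConsume s i := by
  fun_induction pvConsume s i with
  | case1 i h hsp j hges => omega
  | case2 i h hsp j hges ih => have := le_pvSpaceEnd s i; omega
  | case3 i h hsp ih => omega
  | case4 i h => omega

theorem lt_pvConsume (s : List Char) (i : Nat) (h1 : i < s.length)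
    (h2 : s.getD i 'x' ≠ ' ') : i < pvConsume s i := by
  rw [pvConsume]
  simp only [h1, dite_true, h2, dite_false]
  have h3 := le_pvConsume s (i + 1)
  omega

-- A's outer while-loop: skip whitespace, break at end, consume a segment, append it.
def pvOuter (s : List Char) (i : Nat) (acc : List (Int × String)) : List (Int × String) :=
  let start := pvSpaceEnd s i
  if h : s.length ≤ start then acc
  else
    let e := pvConsume s start
    pvOuter s e
      (acc ++ [((start : Int),
        String.ofList (PySem.Chars.strip (PySem.List.slice s (some (start : Int)) (some (e : Int)))))])
termination_by s.length - i
decreasing_by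
  have h1 := le_pvSpaceEnd s i
  have h2 := lt_pvConsume s (pvSpaceEnd s i) (by omega) (pvSpaceEnd_stop s i (by omega))
  omega

def find_text_segments_py (line : String) : List (Int × String) :=
  pvOuter line.toList 0 []

-- ===== PORT B =====
-- one step of B's for-loop over line.split(' ')
def pvStepTok (st : List (Int × String) × Nat × Option Int × List (List Char)) (tok : List Char) :
    List (Int × String) × Nat × Option Int × List (List Char) :=
  let (segments, pos, runStart, runToks) := st
  if tok ≠ [] then
    (segments, pos + tok.length + 1, some (runStart.getD (pos : Int)), runToks ++ [tok])
  else
    if runToks ≠ [] then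
      (segments ++ [(runStart.getD 0,
          String.ofList (PySem.Chars.strip (PySem.Chars.join [' '] runToks)))],
       pos + 1, none, [])
    else (segments, pos + 1, runStart, runToks)

-- B's trailing "if run_tokens: …" flush
def pvFinish (st : List (Int × String) × Nat × Option Int × List (List Char)) :
    List (Int × String) :=
  let (segments, _, runStart, runToks) := st
  if runToks ≠ [] then
    segments ++ [(runStart.getD 0,
        String.ofList (PySem.Chars.strip (PySem.Chars.join [' '] runToks)))]
  else segments

def find_text_segments_py_alt (line : String) : List (Int × String) :=
  pvFinish ((PySem.Chars.splitOn line.toList [' ']).foldl pvStepTok ([], 0, none, []))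

-- ===== PRECONDITION & SPEC =====
def Spec_find_text_segments_py (line : String) (out : List (Int × String)) : Prop := out = find_text_segments_py_alt line
instance (line : String) (out : List (Int × String)) : Decidable (Spec_find_text_segments_py line out) := by unfold Spec_find_text_segments_py; infer_instance

-- ===== CLAIM (what is proved, stated in full; the proofs are below) =====
def Claim_equal_find_text_segments_py : Prop := ∀ (line : String), Dom_find_text_segments_py line → Spec_find_text_segments_py line (find_text_segments_py line)

-- ===== LEMMAS AND PROOFS =====

-- length of the segment A's inner loop consumes, as a structural recursion on the suffix
def segLen : List Char → Nat
  | [] => 0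
  | c :: rest =>
    if c = ' ' then (if rest.head? = some ' ' then 0 else 1 + segLen rest)
    else 1 + segLen rest

theorem segLen_le_length (l : List Char) : segLen l ≤ l.length := by
  induction l with
  | nil => simp [segLen]
  | cons c rest ih => simp only [segLen, List.length_cons]; split <;> (try split) <;> omega

-- the common reference: segments of a character-list suffix starting at absolute position pos
def refSegs (l : List Char) (pos : Nat) : List (Int × String) :=
  match h : l with
  | [] => []
  | c :: rest =>
    if c = ' ' then refSegs rest (pos + 1)
    else ((pos : Int), String.ofList (PySem.Chars.strip (l.take (segLen l)))) ::
          refSegs (l.drop (segLen l)) (pos + segLen l)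
termination_by l.length
decreasing_by
  · simp_all
  · have : 1 ≤ segLen l := by subst h; simp [segLen, *]
    subst h
    simp only [List.length_drop, List.length_cons]
    omega

theorem drop_takeWhile_len (l : List Char) (p : Char → Bool) :
    l.drop (l.takeWhile p).length = l.dropWhile p := by
  calc l.drop (l.takeWhile p).length
      = (l.takeWhile p ++ l.dropWhile p).drop (l.takeWhile p).length := by
        rw [List.takeWhile_append_dropWhile]
    _ = l.dropWhile p := List.drop_left

theorem pvSpaceEnd_spec (s : List Char) (i : Nat) (hi : i ≤ s.length) :
    pvSpaceEnd s i = i + ((s.drop i).takeWhile (fun c => c == ' ')).length := by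
  fun_induction pvSpaceEnd s i with
  | case1 i h ih =>
    rw [List.drop_eq_getElem_cons h.1]
    have hg : s[i] = ' ' := by have := h.2; rwa [List.getD_eq_getElem s 'x' h.1] at this
    rw [ih (by omega)]
    simp [hg]
    omega
  | case2 i h =>
    by_cases hi2 : i < s.length
    · have hg : s.getD i 'x' ≠ ' ' := fun hc => h ⟨hi2, hc⟩
      rw [List.drop_eq_getElem_cons hi2]
      have : ¬ (s[i] = ' ') := by rwa [List.getD_eq_getElem s 'x' hi2] at hg
      simp [this]
    · have : s.length ≤ i := by omega
      rw [List.drop_eq_nil_of_le this]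
      simp

theorem head?_eq_space_iff (l : List Char) :
    l.head? = some ' ' ↔ 0 < (l.takeWhile (fun c => c == ' ')).length := by
  cases l with
  | nil => simp
  | cons c r => by_cases hc : c = ' ' <;> simp [hc, List.takeWhile_cons]

theorem pvConsume_spec (s : List Char) (i : Nat) (hi : i ≤ s.length) :
    pvConsume s i = i + segLen (s.drop i) := by
  fun_induction pvConsume s i with
  | case1 i h hsp j hge =>
    rw [List.drop_eq_getElem_cons h]
    have hg : s[i] = ' ' := by rwa [List.getD_eq_getElem s 'x' h] at hsp
    have hj : j = i + ((s.drop i).takeWhile (fun c => c == ' ')).length :=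
      pvSpaceEnd_spec s i (by omega)
    rw [List.drop_eq_getElem_cons h] at hj
    simp [hg] at hj
    have : (s.drop (i+1)).head? = some ' ' := by
      rw [head?_eq_space_iff]; omega
    simp [segLen, hg, this]
  | case2 i h hsp j hge ih =>
    rw [List.drop_eq_getElem_cons h]
    have hg : s[i] = ' ' := by rwa [List.getD_eq_getElem s 'x' h] at hsp
    have hj : j = i + ((s.drop i).takeWhile (fun c => c == ' ')).length :=
      pvSpaceEnd_spec s i (by omega)
    rw [List.drop_eq_getElem_cons h] at hj
    simp [hg] at hj
    have hh : ¬ ((s.drop (i+1)).head? = some ' ') := by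
      rw [head?_eq_space_iff]; omega
    have hj1 : j = i + 1 := by
      have : ((s.drop (i+1)).takeWhile (fun c => c == ' ')).length = 0 := by
        by_contra hc
        exact hh ((head?_eq_space_iff _).mpr (by omega))
      omega
    rw [ih (by omega), hj1, hg]
    have hs : segLen (' ' :: s.drop (i+1)) = 1 + segLen (s.drop (i+1)) := by
      simp only [segLen]
      rw [if_pos trivial, if_neg hh]
    rw [hs]
    omega
  | case3 i h hsp ih =>
    rw [List.drop_eq_getElem_cons h]
    have hg : ¬ (s[i] = ' ') := by rwa [List.getD_eq_getElem s 'x' h] at hsp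
    rw [ih (by omega)]
    simp [segLen, hg]
    omega
  | case4 i h =>
    have : s.length ≤ i := by omega
    rw [List.drop_eq_nil_of_le this]
    simp [segLen]

theorem refSegs_dropSpaces (l : List Char) (pos : Nat) :
    refSegs l pos = refSegs (l.dropWhile (fun c => c == ' '))
      (pos + (l.takeWhile (fun c => c == ' ')).length) := by
  induction l generalizing pos with
  | nil => simp
  | cons c r ih =>
    by_cases hc : c = ' '
    · rw [refSegs]
      simp only [hc, if_pos rfl]
      rw [ih (pos + 1)]
      simp [List.takeWhile_cons, List.dropWhile_cons]
      ring_nf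
    · simp [List.takeWhile_cons, List.dropWhile_cons, hc]

theorem refSegs_nil (pos : Nat) : refSegs [] pos = [] := by rw [refSegs]

theorem refSegs_cons_ne (c : Char) (r : List Char) (pos : Nat) (hc : ¬ (c = ' ')) :
    refSegs (c :: r) pos =
      ((pos : Int), String.ofList (PySem.Chars.strip ((c :: r).take (segLen (c :: r))))) ::
        refSegs ((c :: r).drop (segLen (c :: r))) (pos + segLen (c :: r)) := by
  rw [refSegs]
  simp [hc]

theorem pvOuter_spec (s : List Char) (i : Nat) (acc : List (Int × String)) (hi : i ≤ s.length) :
    pvOuter s i acc = acc ++ refSegs (s.drop i) i := by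
  fun_induction pvOuter s i acc with
  | case1 i acc start h =>
    have hst : start = i + ((s.drop i).takeWhile (fun c => c == ' ')).length :=
      pvSpaceEnd_spec s i hi
    rw [refSegs_dropSpaces (s.drop i) i, ← drop_takeWhile_len]
    have hnil : (s.drop i).drop ((s.drop i).takeWhile (fun c => c == ' ')).length = [] := by
      apply List.drop_eq_nil_of_le
      simp only [List.length_drop]
      omega
    rw [hnil, refSegs_nil, List.append_nil]
  | case2 i acc start h e ih =>
    have hi' : i ≤ s.length := hi
    have hst : start = i + ((s.drop i).takeWhile (fun c => c == ' ')).length :=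
      pvSpaceEnd_spec s i hi'
    have hlt : start < s.length := by omega
    have hdw : s.drop start = (s.drop i).dropWhile (fun c => c == ' ') := by
      rw [← drop_takeWhile_len, List.drop_drop, ← hst]
    have hne : s.getD start 'x' ≠ ' ' := pvSpaceEnd_stop s i hlt
    have hg : ¬ (s[start] = ' ') := by rwa [List.getD_eq_getElem s 'x' hlt] at hne
    have he : e = start + segLen (s.drop start) := pvConsume_spec s start (by omega)
    have hele : e ≤ s.length := by
      have h2 := segLen_le_length (s.drop start)
      simp only [List.length_drop] at h2
      omega
    rw [ih hele]
    rw [refSegs_dropSpaces (s.drop i) i, ← hdw, ← hst]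
    have hcons : s.drop start = s[start] :: s.drop (start + 1) := List.drop_eq_getElem_cons hlt
    rw [hcons, refSegs_cons_ne _ _ _ hg, ← hcons]
    have hslice : PySem.List.slice s (some (start : Int)) (some (e : Int)) =
        (s.drop start).take (segLen (s.drop start)) := by
      rw [PySem.List.slice_natCast, he, Nat.add_sub_cancel_left]
    have hdrop : (s.drop start).drop (segLen (s.drop start)) = s.drop e := by
      rw [List.drop_drop, ← he]
    rw [hslice, hdrop, ← he]
    simp

theorem find_text_segments_py_eq_ref (line : String) :
    find_text_segments_py line = refSegs line.toList 0 := by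
  rw [find_text_segments_py, pvOuter_spec line.toList 0 [] (by omega)]
  simp

def spTok : List Char → List (List Char)
  | [] => [[]]
  | c :: rest => if c = ' ' then [] :: spTok rest else (spTok rest).modifyHead (c :: ·)

theorem spTok_ne_nil (l : List Char) : spTok l ≠ [] := by
  induction l with
  | nil => simp [spTok]
  | cons c r =>
    simp only [spTok]
    split
    · simp
    · rename_i ih; cases h : spTok r <;> simp_all [List.modifyHead]

theorem splitOn_go_spec (fuel : Nat) (l cur : List Char) (acc : List (List Char))
    (hf : l.length ≤ fuel) :
    PySem.Chars.splitOn.go [' '] fuel l cur acc =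
      acc.reverse ++ (spTok l).modifyHead (cur.reverse ++ ·) := by
  induction fuel generalizing l cur acc with
  | zero =>
    have : l = [] := by cases l <;> simp_all
    subst this
    rw [PySem.Chars.splitOn.go]
    simp [spTok]
  | succ fuel ih =>
    cases l with
    | nil =>
      rw [PySem.Chars.splitOn.go]
      simp [spTok]
      omega
    | cons c rest =>
      rw [PySem.Chars.splitOn.go]
      by_cases hc : c = ' '
      · have hpre : [' '].isPrefixOf (c :: rest) = true := by simp [List.isPrefixOf, hc]
        rw [if_pos hpre]
        simp only [List.length_singleton, List.drop_succ_cons, List.drop_zero]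
        rw [ih rest [] (cur.reverse :: acc) (by simpa using hf)]
        simp only [spTok, if_pos hc, hc]
        cases h : spTok rest <;> simp [List.modifyHead]
      · have hpre : ¬ ([' '].isPrefixOf (c :: rest) = true) := by simp [List.isPrefixOf, Ne.symm hc]
        rw [if_neg hpre]
        rw [ih rest (c :: cur) acc (by simpa using hf)]
        have hnn := spTok_ne_nil rest
        simp only [spTok, hc, if_neg hc]
        cases h : spTok rest with
        | nil => exact absurd h hnn
        | cons t ts => simp [List.modifyHead]

theorem splitOn_space (s : List Char) : PySem.Chars.splitOn s [' '] = spTok s := by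
  rw [PySem.Chars.splitOn, splitOn_go_spec _ _ _ _ (by omega)]
  have := spTok_ne_nil s
  cases h : spTok s with
  | nil => exact absurd h this
  | cons t ts => simp [List.modifyHead]

-- ======== new B-side material ========
def twNS (l : List Char) : List Char := l.takeWhile (fun c => !(c == ' '))
def dwNS (l : List Char) : List Char := l.dropWhile (fun c => !(c == ' '))

theorem twNS_nospace (l : List Char) : ∀ c ∈ twNS l, ¬ (c = ' ') := by
  intro c hc
  have := List.mem_takeWhile_imp hc
  simpa using this

theorem dwNS_head (l : List Char) (d : Char) (r2 : List Char) (h : dwNS l = d :: r2) :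
    d = ' ' := by
  induction l with
  | nil => simp [dwNS] at h
  | cons c r ih =>
    by_cases hc : c = ' '
    · simp [dwNS, List.dropWhile_cons, hc] at h
      exact (hc ▸ h.1.symm)
    · simp [dwNS, List.dropWhile_cons, hc] at h
      exact ih h

def restToks (l : List Char) : List (List Char) :=
  match dwNS l with
  | [] => []
  | _ :: r => spTok r

theorem spTok_peel (l : List Char) : spTok l = twNS l :: restToks l := by
  induction l with
  | nil => simp [spTok, twNS, restToks, dwNS]
  | cons c r ih =>
    by_cases hc : c = ' '
    · simp [spTok, hc, twNS, restToks, dwNS, List.takeWhile_cons, List.dropWhile_cons]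
    · simp only [spTok, if_neg hc, ih]
      simp [twNS, restToks, dwNS, List.takeWhile_cons, List.dropWhile_cons, hc,
        List.modifyHead]

-- strip facts
theorem rstrip_append_space (y : List Char) :
    PySem.Chars.rstrip (y ++ [' ']) = PySem.Chars.rstrip y := by
  simp [PySem.Chars.rstrip, List.reverse_append, List.dropWhile_cons,
    show PySem.Chars.isspace ' ' = true from rfl]

theorem strip_append_space (x : List Char) :
    PySem.Chars.strip (x ++ [' ']) = PySem.Chars.strip x := by
  simp only [PySem.Chars.strip, PySem.Chars.lstrip, List.dropWhile_append]
  by_cases h : (List.dropWhile PySem.Chars.isspace x).isEmpty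
  · rw [if_pos h]
    have h' : List.dropWhile PySem.Chars.isspace x = [] := by
      simpa [List.isEmpty_iff] using h
    rw [h']
    rfl
  · rw [if_neg h, rstrip_append_space]

theorem segLen_append_nospace (t l : List Char) (h : ∀ c ∈ t, ¬ (c = ' ')) :
    segLen (t ++ l) = t.length + segLen l := by
  induction t with
  | nil => simp
  | cons c t' ih =>
    have hc : ¬ (c = ' ') := h c (by simp)
    simp only [List.cons_append, segLen, if_neg hc, List.length_cons]
    rw [ih (fun c hc' => h c (by simp [hc']))]
    omega

theorem segLen_single_space : segLen [' '] = 1 := by simp [segLen]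
theorem segLen_double_space (r : List Char) : segLen (' ' :: ' ' :: r) = 0 := by simp [segLen]
theorem segLen_space_cons (c : Char) (r : List Char) (hc : ¬ (c = ' ')) :
    segLen (' ' :: c :: r) = 1 + segLen (c :: r) := by simp [segLen, hc]

def refMid (txt : List Char) (s0 : Int) (l : List Char) (pos : Nat) : List (Int × String) :=
  match l with
  | [] => [(s0, String.ofList (PySem.Chars.strip txt))]
  | c :: rest =>
    if c = ' ' then (s0, String.ofList (PySem.Chars.strip txt)) :: refSegs rest (pos + 1)
    else (s0, String.ofList (PySem.Chars.strip (txt ++ ' ' :: l.take (segLen l)))) ::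
         refSegs (l.drop (segLen l)) (pos + segLen l)

theorem refSegs_token_only (t0 : List Char) (pos : Nat) (h0 : t0 ≠ [])
    (hns : ∀ c ∈ t0, ¬ (c = ' ')) :
    refSegs t0 pos = [((pos : Int), String.ofList (PySem.Chars.strip t0))] := by
  cases t0 with
  | nil => simp at h0
  | cons c r =>
    have hseg : segLen (c :: r) = (c :: r).length := by
      have := segLen_append_nospace (c :: r) [] hns
      simpa using this
    rw [refSegs_cons_ne c r pos (hns c (by simp)), hseg]
    simp [refSegs_nil]

theorem refMid_token_only (txt t0 : List Char) (s0 : Int) (pos : Nat) (h0 : t0 ≠ [])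
    (hns : ∀ c ∈ t0, ¬ (c = ' ')) :
    refMid txt s0 t0 pos = [(s0, String.ofList (PySem.Chars.strip (txt ++ ' ' :: t0)))] := by
  cases t0 with
  | nil => simp at h0
  | cons c r =>
    have hseg : segLen (c :: r) = (c :: r).length := by
      have := segLen_append_nospace (c :: r) [] hns
      simpa using this
    simp only [refMid, if_neg (hns c (by simp)), hseg]
    simp [refSegs_nil]

theorem refSegs_run (t0 r2 : List Char) (pos : Nat) (h0 : t0 ≠ [])
    (hns : ∀ c ∈ t0, ¬ (c = ' ')) :
    refSegs (t0 ++ ' ' :: r2) pos = refMid t0 (pos : Int) r2 (pos + t0.length + 1) := by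
  obtain ⟨c, t', rfl⟩ : ∃ c t', t0 = c :: t' := by
    cases t0 with | nil => simp at h0 | cons c t' => exact ⟨c, t', rfl⟩
  have hc : ¬ (c = ' ') := hns c (by simp)
  rw [List.cons_append, refSegs_cons_ne _ _ _ hc, ← List.cons_append]
  cases r2 with
  | nil =>
    have hseg : segLen ((c :: t') ++ [' ']) = (c :: t').length + 1 := by
      rw [segLen_append_nospace _ _ hns, segLen_single_space]
    rw [hseg]
    rw [show (c :: t').length + 1 = ((c :: t') ++ [' ']).length by simp]
    rw [List.take_length, List.drop_length, refSegs_nil]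
    simp only [refMid]
    rw [strip_append_space]
  | cons d r3 =>
    by_cases hd : d = ' '
    · subst hd
      have hseg : segLen ((c :: t') ++ ' ' :: ' ' :: r3) = (c :: t').length := by
        rw [segLen_append_nospace _ _ hns, segLen_double_space]
        omega
      rw [hseg, List.take_left, List.drop_left]
      rw [refSegs]
      rw [if_pos rfl]
      rw [refSegs]
      rw [if_pos rfl]
      simp only [refMid, if_pos rfl]
      rw [if_pos trivial]
    · have hseg : segLen ((c :: t') ++ ' ' :: d :: r3) = (c :: t').length + (1 + segLen (d :: r3)) := by
        rw [segLen_append_nospace _ _ hns, segLen_space_cons _ _ hd]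
      rw [hseg, List.take_length_add_append, List.drop_length_add_append]
      simp only [refMid, if_neg hd]
      have h1 : List.take (1 + segLen (d :: r3)) (' ' :: d :: r3) =
          ' ' :: List.take (segLen (d :: r3)) (d :: r3) := by
        rw [Nat.add_comm, List.take_succ_cons]
      have h2 : List.drop (1 + segLen (d :: r3)) (' ' :: d :: r3) =
          List.drop (segLen (d :: r3)) (d :: r3) := by
        rw [Nat.add_comm, List.drop_succ_cons]
      rw [h1, h2]
      have : pos + ((c :: t').length + (1 + segLen (d :: r3))) =
          pos + (c :: t').length + 1 + segLen (d :: r3) := by omega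
      rw [this]

theorem refMid_run (txt t0 r2 : List Char) (s0 : Int) (pos : Nat) (h0 : t0 ≠ [])
    (hns : ∀ c ∈ t0, ¬ (c = ' ')) :
    refMid txt s0 (t0 ++ ' ' :: r2) pos =
      refMid (txt ++ ' ' :: t0) s0 r2 (pos + t0.length + 1) := by
  obtain ⟨c, t', rfl⟩ : ∃ c t', t0 = c :: t' := by
    cases t0 with | nil => simp at h0 | cons c t' => exact ⟨c, t', rfl⟩
  have hc : ¬ (c = ' ') := hns c (by simp)
  rw [show (c :: t') ++ ' ' :: r2 = c :: (t' ++ ' ' :: r2) from rfl]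
  simp only [refMid, if_neg hc]
  rw [show c :: (t' ++ ' ' :: r2) = (c :: t') ++ ' ' :: r2 from rfl]
  cases r2 with
  | nil =>
    have hseg : segLen ((c :: t') ++ [' ']) = (c :: t').length + 1 := by
      rw [segLen_append_nospace _ _ hns, segLen_single_space]
    rw [hseg]
    rw [show (c :: t').length + 1 = ((c :: t') ++ [' ']).length by simp]
    rw [List.take_length, List.drop_length, refSegs_nil]
    have : txt ++ ' ' :: ((c :: t') ++ [' ']) = (txt ++ ' ' :: (c :: t')) ++ [' '] := by simp
    rw [this, strip_append_space]
  | cons d r3 =>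
    by_cases hd : d = ' '
    · subst hd
      have hseg : segLen ((c :: t') ++ ' ' :: ' ' :: r3) = (c :: t').length := by
        rw [segLen_append_nospace _ _ hns, segLen_double_space]
        omega
      rw [hseg, List.take_left, List.drop_left]
      rw [refSegs]
      rw [if_pos rfl]
      rw [refSegs]
      rw [if_pos rfl]
      simp only [refMid, if_pos rfl]
      rw [if_pos trivial]
    · have hseg : segLen ((c :: t') ++ ' ' :: d :: r3) = (c :: t').length + (1 + segLen (d :: r3)) := by
        rw [segLen_append_nospace _ _ hns, segLen_space_cons _ _ hd]
      rw [hseg, List.take_length_add_append, List.drop_length_add_append]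
      simp only [refMid, if_neg hd]
      have h1 : List.take (1 + segLen (d :: r3)) (' ' :: d :: r3) =
          ' ' :: List.take (segLen (d :: r3)) (d :: r3) := by
        rw [Nat.add_comm, List.take_succ_cons]
      have h2 : List.drop (1 + segLen (d :: r3)) (' ' :: d :: r3) =
          List.drop (segLen (d :: r3)) (d :: r3) := by
        rw [Nat.add_comm, List.drop_succ_cons]
      rw [h1, h2]
      have h3 : pos + ((c :: t').length + (1 + segLen (d :: r3))) =
          pos + (c :: t').length + 1 + segLen (d :: r3) := by omega
      rw [h3]
      have h4 : txt ++ ' ' :: ((c :: t') ++ ' ' :: List.take (segLen (d :: r3)) (d :: r3)) =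
          (txt ++ ' ' :: (c :: t')) ++ ' ' :: List.take (segLen (d :: r3)) (d :: r3) := by simp
      rw [h4]

theorem join_single (t : List Char) : PySem.Chars.join [' '] [t] = t := by
  simp [PySem.Chars.join, List.intercalate]

theorem join_snoc (rt : List (List Char)) (t : List Char) (h : rt ≠ []) :
    PySem.Chars.join [' '] (rt ++ [t]) = PySem.Chars.join [' '] rt ++ ' ' :: t := by
  induction rt with
  | nil => simp at h
  | cons t0 ts ih =>
    cases ts with
    | nil => simp [PySem.Chars.join, List.intercalate, List.intersperse, List.flatten]
    | cons a l =>
      have hj : ∀ (ys : List (List Char)),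
          PySem.Chars.join [' '] (t0 :: a :: ys) = t0 ++ ' ' :: PySem.Chars.join [' '] (a :: ys) := by
        intro ys
        simp [PySem.Chars.join, List.intercalate, List.intersperse, List.flatten]
      rw [show (t0 :: a :: l) ++ [t] = t0 :: ((a :: l) ++ [t]) from rfl]
      rw [show (a :: l) ++ [t] = a :: (l ++ [t]) from rfl, hj]
      rw [show a :: (l ++ [t]) = (a :: l) ++ [t] from rfl, ih (by simp), hj]
      simp

theorem refSegs_space (r : List Char) (pos : Nat) :
    refSegs (' ' :: r) pos = refSegs r (pos + 1) := by
  rw [refSegs]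
  simp

theorem twNS_cons_ne (c : Char) (r : List Char) (hc : ¬ (c = ' ')) :
    twNS (c :: r) = c :: twNS r := by
  simp [twNS, List.takeWhile_cons, hc]

theorem tok_split (l : List Char) :
    l = twNS l ++ dwNS l := (List.takeWhile_append_dropWhile).symm

theorem bmain (n : Nat) : ∀ (l : List Char), l.length ≤ n →
    (∀ (pos : Nat) (segs : List (Int × String)),
        pvFinish ((spTok l).foldl pvStepTok (segs, pos, none, [])) = segs ++ refSegs l pos)
  ∧ (∀ (pos : Nat) (segs : List (Int × String)) (s0 : Int) (rt : List (List Char)), rt ≠ [] →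
        pvFinish ((spTok l).foldl pvStepTok (segs, pos, some s0, rt)) =
          segs ++ refMid (PySem.Chars.join [' '] rt) s0 l pos) := by
  induction n with
  | zero =>
    intro l hl
    have : l = [] := by cases l <;> simp_all
    subst this
    constructor
    · intro pos segs
      simp [spTok, pvStepTok, pvFinish, refSegs_nil]
    · intro pos segs s0 rt hrt
      simp [spTok, pvStepTok, pvFinish, refMid, hrt]
  | succ n ihn =>
    intro l hl
    cases l with
    | nil =>
      constructor
      · intro pos segs
        simp [spTok, pvStepTok, pvFinish, refSegs_nil]
      · intro pos segs s0 rt hrt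
        simp [spTok, pvStepTok, pvFinish, refMid, hrt]
    | cons c r =>
      by_cases hc : c = ' '
      · subst hc
        constructor
        · intro pos segs
          rw [show spTok (' ' :: r) = [] :: spTok r by simp [spTok]]
          rw [List.foldl_cons]
          rw [show pvStepTok (segs, pos, none, []) [] = (segs, pos + 1, none, []) by
            simp [pvStepTok]]
          rw [(ihn r (by simpa using hl)).1 (pos + 1) segs, refSegs_space]
        · intro pos segs s0 rt hrt
          rw [show spTok (' ' :: r) = [] :: spTok r by simp [spTok]]
          rw [List.foldl_cons]
          rw [show pvStepTok (segs, pos, some s0, rt) [] =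
              (segs ++ [(s0, String.ofList (PySem.Chars.strip (PySem.Chars.join [' '] rt)))],
               pos + 1, none, []) by simp [pvStepTok, hrt]]
          rw [(ihn r (by simpa using hl)).1 (pos + 1) _]
          rw [show refMid (PySem.Chars.join [' '] rt) s0 (' ' :: r) pos =
              (s0, String.ofList (PySem.Chars.strip (PySem.Chars.join [' '] rt))) ::
                refSegs r (pos + 1) by simp [refMid]]
          simp
      · -- non-space head: peel the first token
        have hpeel := spTok_peel (c :: r)
        have htw : twNS (c :: r) = c :: twNS r := twNS_cons_ne c r hc
        have htne : twNS (c :: r) ≠ [] := by rw [htw]; simp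
        have hns := twNS_nospace (c :: r)
        constructor
        · intro pos segs
          rw [hpeel, List.foldl_cons]
          rw [show pvStepTok (segs, pos, none, []) (twNS (c :: r)) =
              (segs, pos + (twNS (c :: r)).length + 1, some (pos : Int), [twNS (c :: r)]) by
            simp [pvStepTok, htne]]
          cases hdw : dwNS (c :: r) with
          | nil =>
            have hl0 : (c :: r) = twNS (c :: r) := by
              conv_lhs => rw [tok_split (c :: r)]
              rw [hdw, List.append_nil]
            rw [show restToks (c :: r) = [] by simp [restToks, hdw]]
            simp only [List.foldl_nil]
            rw [show pvFinish (segs, pos + (twNS (c :: r)).length + 1, some (pos : Int),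
                [twNS (c :: r)]) = segs ++ [((pos : Int),
                  String.ofList (PySem.Chars.strip (PySem.Chars.join [' '] [twNS (c :: r)])))] by
              simp [pvFinish]]
            rw [join_single]
            conv_rhs => rw [hl0]
            rw [refSegs_token_only _ _ htne (fun x hx => hns x hx)]
          | cons d r2 =>
            have hd : d = ' ' := dwNS_head _ _ _ hdw
            subst hd
            have hl0 : (c :: r) = twNS (c :: r) ++ ' ' :: r2 := by
              conv_lhs => rw [tok_split (c :: r)]
              rw [hdw]
            have hr2 : r2.length ≤ n := by
              have h5 := congrArg List.length hl0
              simp only [List.length_cons, List.length_append] at h5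
              have h6 : r.length + 1 ≤ n + 1 := by simpa using hl
              omega
            rw [show restToks (c :: r) = spTok r2 by simp [restToks, hdw]]
            rw [(ihn r2 hr2).2 (pos + (twNS (c :: r)).length + 1) segs (pos : Int)
                [twNS (c :: r)] (by simp)]
            rw [join_single]
            conv_rhs => rw [hl0]
            rw [refSegs_run _ _ _ htne (fun x hx => hns x hx)]
        · intro pos segs s0 rt hrt
          rw [hpeel, List.foldl_cons]
          rw [show pvStepTok (segs, pos, some s0, rt) (twNS (c :: r)) =
              (segs, pos + (twNS (c :: r)).length + 1, some s0, rt ++ [twNS (c :: r)]) by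
            simp [pvStepTok, htne]]
          cases hdw : dwNS (c :: r) with
          | nil =>
            have hl0 : (c :: r) = twNS (c :: r) := by
              conv_lhs => rw [tok_split (c :: r)]
              rw [hdw, List.append_nil]
            rw [show restToks (c :: r) = [] by simp [restToks, hdw]]
            simp only [List.foldl_nil]
            rw [show pvFinish (segs, pos + (twNS (c :: r)).length + 1, some s0,
                rt ++ [twNS (c :: r)]) = segs ++ [(s0, String.ofList (PySem.Chars.strip
                  (PySem.Chars.join [' '] (rt ++ [twNS (c :: r)]))))] by
              simp [pvFinish]]
            rw [join_snoc _ _ hrt]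
            conv_rhs => rw [hl0]
            rw [refMid_token_only _ _ _ _ htne (fun x hx => hns x hx)]
          | cons d r2 =>
            have hd : d = ' ' := dwNS_head _ _ _ hdw
            subst hd
            have hl0 : (c :: r) = twNS (c :: r) ++ ' ' :: r2 := by
              conv_lhs => rw [tok_split (c :: r)]
              rw [hdw]
            have hr2 : r2.length ≤ n := by
              have h5 := congrArg List.length hl0
              simp only [List.length_cons, List.length_append] at h5
              have h6 : r.length + 1 ≤ n + 1 := by simpa using hl
              omega
            rw [show restToks (c :: r) = spTok r2 by simp [restToks, hdw]]
            rw [(ihn r2 hr2).2 (pos + (twNS (c :: r)).length + 1) segs s0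
                (rt ++ [twNS (c :: r)]) (by simp)]
            rw [join_snoc _ _ hrt]
            conv_rhs => rw [hl0]
            rw [refMid_run _ _ _ _ _ htne (fun x hx => hns x hx)]


theorem alt_eq_ref (line : String) :
    find_text_segments_py_alt line = refSegs line.toList 0 := by
  rw [find_text_segments_py_alt, splitOn_space,
    (bmain line.toList.length line.toList le_rfl).1 0 []]
  simp

-- ===== VERDICT (by name: the statement is the Claim_ definition above) =====
theorem find_text_segments_py_spec : Claim_equal_find_text_segments_py := by
  intro line _
  unfold Spec_find_text_segments_py
  rw [find_text_segments_py_eq_ref, alt_eq_ref]
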